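-- pv_equiv track=rewrite | github.com/raswanthmalai19/VisionCraft-Text-to-Comic-Video-Generator | comic_generator.py | enhance_panel_description
-- ===== SOURCE A (Python) =====
-- def enhance_panel_description(panel_text):
--     """Enhance panel text to be more visually descriptive for AI generation."""
--     # Add visual action words - keep it concise
--     enhanced_text = panel_text
--
--     # Replace only the most important abstract concepts with visual ones
--     replacements = {
--         'was happy': 'smiled',
--         'was sad': 'frowned',
--         'was angry': 'scowled',
--         'was scared': 'cowered',
--         'discovered': 'found',
--         'realized': 'understood'
--     }
--
--     for old, new in replacements.items():
--         enhanced_text = enhanced_text.replace(old, new)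
--
--     return enhanced_text
-- ===== SOURCE B (Python) =====
-- def enhance_panel_description(panel_text):
--     # one left-to-right pass; at each position try the keys in table order
--     table = [
--         ('was happy', 'smiled'),
--         ('was sad', 'frowned'),
--         ('was angry', 'scowled'),
--         ('was scared', 'cowered'),
--         ('discovered', 'found'),
--         ('realized', 'understood'),
--     ]
--     out = []
--     i = 0
--     n = len(panel_text)
--     while i < n:
--         for old, new in table:
--             if panel_text.startswith(old, i):
--                 out.append(new)
--                 i += len(old)
--                 break
--         else:
--             out.append(panel_text[i])
--             i += 1
--     return ''.join(out)
-- ===== Notes on version B (the rewrite author's own statement) =====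
-- stated objective: alternative
-- what changed: Replaces six sequential whole-text str.replace passes by a single left-to-right scan that at each position tries the six keys in table order, emits the replacement and skips the matched key, so the text is traversed once and replacement output is never rescanned. …
-- outside the precondition, e.g. on enhance_panel_description('was sadiscovered'): A returns 'frownefound', B returns 'frownediscovered'; on enhance_panel_description('realizediscovered'): A returns 'realizefound', B returns 'understoodiscovered'
import Mathlib
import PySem

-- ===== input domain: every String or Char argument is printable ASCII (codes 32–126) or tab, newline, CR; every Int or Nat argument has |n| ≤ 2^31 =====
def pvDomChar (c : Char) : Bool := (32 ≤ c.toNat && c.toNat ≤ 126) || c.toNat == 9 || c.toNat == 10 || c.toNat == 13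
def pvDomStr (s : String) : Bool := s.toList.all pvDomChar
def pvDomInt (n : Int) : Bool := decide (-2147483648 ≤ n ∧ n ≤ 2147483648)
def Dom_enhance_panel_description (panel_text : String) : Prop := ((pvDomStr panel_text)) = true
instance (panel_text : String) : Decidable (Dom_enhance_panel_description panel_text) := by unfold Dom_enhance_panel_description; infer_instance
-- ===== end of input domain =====

-- B replaces A's six sequential full-text str.replace passes by one left-to-right table-driven
-- scan (objective: alternative); Pre_ excludes the five junction substrings on which the two
-- replacement semantics legitimately diverge (see the sentence above Pre_).

-- ===== PORT A =====
-- the dict literal `replacements`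
def pvReplacementsA : PySem.Dict String String :=
  PySem.Dict.ofList
    [("was happy", "smiled"), ("was sad", "frowned"), ("was angry", "scowled"),
     ("was scared", "cowered"), ("discovered", "found"), ("realized", "understood")]

-- for old, new in replacements.items(): enhanced_text = enhanced_text.replace(old, new)
def enhance_panel_description (panel_text : String) : String :=
  pvReplacementsA.items.foldl (fun enhanced_text p => PySem.Str.replace enhanced_text p.1 p.2) panel_text

-- ===== PORT B =====
-- B's `table` of (old, new) pairs, on the code-point level
def pvPairsB : List (List Char × List Char) :=
  [("was happy".toList, "smiled".toList), ("was sad".toList, "frowned".toList),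
   ("was angry".toList, "scowled".toList), ("was scared".toList, "cowered".toList),
   ("discovered".toList, "found".toList), ("realized".toList, "understood".toList)]

-- the while-loop of B: `out` is the accumulator list, `l` the remaining text from position i;
-- the inner for-with-break is `find?` over the pairs in dict order.  `fuel` only makes the
-- loop structurally total (one unit per iteration; every iteration consumes at least one
-- character, so fuel = length never runs out).
def pvScanGo (fuel : Nat) (l : List Char) (out : List (List Char)) : List (List Char) :=
  match fuel, l with
  | _, [] => out
  | 0, _ => out
  | fuel + 1, c :: t =>
    match pvPairsB.find? (fun p => p.1.isPrefixOf (c :: t)) with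
    | some p => pvScanGo fuel ((c :: t).drop p.1.length) (out ++ [p.2])
    | none => pvScanGo fuel t (out ++ [[c]])

-- return ''.join(out)
def enhance_panel_description_alt (panel_text : String) : String :=
  String.ofList (pvScanGo panel_text.toList.length panel_text.toList []).flatten

-- ===== PRECONDITION & SPEC =====
-- Pre_ excludes texts containing one of five junction substrings (a key overlapping, or a
-- replacement value recombining with, the following text into a later key, e.g.
-- '…was sadiscovered…', '…realizediscovered…'): there sequential whole-text replacement (A)
-- and one-pass leftmost replacement (B) are two equally defensible semantics that happen to
-- diverge, a corner no caller of this text-beautifier would specify; everywhere else A = B.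
def Pre_enhance_panel_description (panel_text : String) : Prop :=
  (PySem.Str.isIn "was happyiscovered" panel_text ||
   PySem.Str.isIn "was sadiscovered" panel_text ||
   PySem.Str.isIn "was angryiscovered" panel_text ||
   PySem.Str.isIn "was scarediscovered" panel_text ||
   PySem.Str.isIn "realizediscovered" panel_text) = false
instance (panel_text : String) : Decidable (Pre_enhance_panel_description panel_text) := by
  unfold Pre_enhance_panel_description; infer_instance

def pvWitness_enhance_panel_description : String := "She was happy and discovered the door"

def Spec_enhance_panel_description (panel_text : String) (out : String) : Prop :=
  out = enhance_panel_description_alt panel_text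
instance (panel_text : String) (out : String) : Decidable (Spec_enhance_panel_description panel_text out) := by
  unfold Spec_enhance_panel_description; infer_instance

-- ===== CLAIM (what is proved, stated in full; the proofs are below) =====
def Claim_equal_enhance_panel_description : Prop :=
  ∀ (panel_text : String), Dom_enhance_panel_description panel_text →
    Pre_enhance_panel_description panel_text →
    Spec_enhance_panel_description panel_text (enhance_panel_description panel_text)

-- ===== LEMMAS AND PROOFS =====

-- ---- generic list-prefix tools ----

theorem pv_prefix_split {α : Type} (k x z : List α) (h : k <+: x ++ z) :
    k <+: x ∨ (x <+: k ∧ k.drop x.length <+: z) := by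
  induction x generalizing k with
  | nil => exact Or.inr ⟨List.nil_prefix, by simpa using h⟩
  | cons a x' ih =>
    cases k with
    | nil => exact Or.inl (List.nil_prefix)
    | cons b k' =>
      rw [List.cons_append, List.cons_prefix_cons] at h
      obtain ⟨rfl, h'⟩ := h
      rcases ih k' h' with h1 | ⟨h2, h3⟩
      · exact Or.inl (List.cons_prefix_cons.mpr ⟨rfl, h1⟩)
      · exact Or.inr ⟨List.cons_prefix_cons.mpr ⟨rfl, h2⟩, by simpa using h3⟩

theorem pv_prefix_append_left {α : Type} (a : List α) {x w : List α} (h : x <+: w) :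
    a ++ x <+: a ++ w := by
  obtain ⟨t, ht⟩ := h
  exact ⟨t, by rw [List.append_assoc, ht]⟩

-- ---- a clean recursive form of Python's str.replace (nonempty pattern) ----

def pvRepl (k v : List Char) (l : List Char) : List Char :=
  if h : k ≠ [] ∧ k.isPrefixOf l then v ++ pvRepl k v (l.drop k.length)
  else
    match l with
    | [] => []
    | c :: t => c :: pvRepl k v t
termination_by l.length
decreasing_by
  · have hp : k <+: l := List.isPrefixOf_iff_prefix.mp h.2
    have h1 := hp.length_le
    have h2 : 0 < k.length := List.length_pos_iff.mpr h.1
    simp only [List.length_drop]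
    omega
  · simp

theorem pvRepl_nil (k v : List Char) : pvRepl k v [] = [] := by
  rw [pvRepl]
  split
  · rename_i h
    exfalso
    have := List.isPrefixOf_iff_prefix.mp h.2
    have := this.length_le
    have : 0 < k.length := List.length_pos_iff.mpr h.1
    simp_all
  · rfl

theorem pvRepl_pos (k v l : List Char) (hk : k ≠ []) (hp : k <+: l) :
    pvRepl k v l = v ++ pvRepl k v (l.drop k.length) := by
  rw [pvRepl, dif_pos ⟨hk, List.isPrefixOf_iff_prefix.mpr hp⟩]

theorem pvRepl_neg (k v : List Char) (c : Char) (t : List Char)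
    (hp : ¬ k <+: c :: t) : pvRepl k v (c :: t) = c :: pvRepl k v t := by
  rw [pvRepl, dif_neg]
  intro h
  exact hp (List.isPrefixOf_iff_prefix.mp h.2)

theorem pvRepl_head (k v u : List Char) (hk : k ≠ []) :
    pvRepl k v (k ++ u) = v ++ pvRepl k v u := by
  rw [pvRepl_pos k v (k ++ u) hk (List.prefix_append k u), List.drop_left]

-- pvRepl IS PySem's str.replace for a nonempty pattern
theorem pv_go_spec (k v : List Char) (hk : k ≠ []) :
    ∀ fuel l acc, l.length ≤ fuel →
      PySem.Chars.replace.go k v fuel l acc = acc.reverse ++ pvRepl k v l := by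
  intro fuel
  induction fuel with
  | zero =>
    intro l acc hl
    have : l = [] := List.length_eq_zero_iff.mp (Nat.le_zero.mp hl)
    subst this
    simp [PySem.Chars.replace.go, pvRepl_nil]
  | succ f ih =>
    intro l acc hl
    cases l with
    | nil => simp [PySem.Chars.replace.go, pvRepl_nil]
    | cons c t =>
      rw [PySem.Chars.replace.go]
      by_cases hp : k.isPrefixOf (c :: t)
      · rw [if_pos hp]
        have hpre : k <+: c :: t := List.isPrefixOf_iff_prefix.mp hp
        have hklen : 0 < k.length := List.length_pos_iff.mpr hk
        have h1 : ((c :: t).drop k.length).length ≤ f := by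
          simp only [List.length_drop, List.length_cons] at *
          omega
        rw [ih _ _ h1, pvRepl_pos k v (c :: t) hk hpre]
        simp
      · rw [if_neg hp]
        have h1 : t.length ≤ f := by simpa using hl
        rw [ih _ _ h1, pvRepl_neg k v c t (fun hc => hp (List.isPrefixOf_iff_prefix.mpr hc))]
        simp

theorem pv_replace_eq (k v l : List Char) (hk : k ≠ []) :
    PySem.Chars.replace l k v = pvRepl k v l := by
  rw [PySem.Chars.replace]
  rw [if_neg (by simpa using hk)]
  simpa using pv_go_spec k v hk l.length l [] le_rfl

-- ---- canonical form of one replacement pass ----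

theorem pvRepl_cases (k v : List Char) (hk : k ≠ []) :
    ∀ (l : List Char), pvRepl k v l = l ∨
      ∃ x y, l = x ++ k ++ y ∧ pvRepl k v l = x ++ v ++ pvRepl k v y := by
  intro l
  induction hn : l.length using Nat.strong_induction_on generalizing l with
  | _ n ih =>
  subst hn
  by_cases hp : k <+: l
  · obtain ⟨y, hy⟩ := hp
    right
    refine ⟨[], y, by simp [hy.symm], ?_⟩
    rw [← hy, pvRepl_head k v y hk]
    simp
  · cases l with
    | nil => left; exact pvRepl_nil k v
    | cons c t =>
      rw [pvRepl_neg k v c t hp]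
      rcases ih t.length (by simp) t rfl with h1 | ⟨x, y, hxy, hr⟩
      · left; rw [h1]
      · right
        exact ⟨c :: x, y, by simp [hxy], by simp [hr]⟩

-- ---- occurrences of a "protected" word k' are never created by a pass ----

theorem pv_preserve (k v k' : List Char) (hk : k ≠ [])
    (hcond : ∀ m, m < k'.length → ¬ (k'.drop m <+: v) ∧ ¬ (v <+: k'.drop m))
    (a w : List Char) (h : ¬ k' <+: a ++ w) : ¬ k' <+: a ++ pvRepl k v w := by
  intro hp
  rcases pvRepl_cases k v hk w with h1 | ⟨x, y, hxy, hr⟩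
  · rw [h1] at hp; exact h hp
  · rw [hr, ← List.append_assoc, ← List.append_assoc] at hp
    rw [List.append_assoc] at hp
    rcases pv_prefix_split k' (a ++ x) (v ++ pvRepl k v y) hp with h2 | ⟨h3, h4⟩
    · apply h
      have : a ++ x <+: a ++ w := by
        refine pv_prefix_append_left a ?_
        exact ⟨k ++ y, by rw [hxy, List.append_assoc]⟩
      exact h2.trans this
    · by_cases hm : (a ++ x).length < k'.length
      · rcases pv_prefix_split (k'.drop (a ++ x).length) v (pvRepl k v y) h4 with h5 | ⟨h6, h7⟩
        · exact (hcond _ hm).1 h5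
        · exact (hcond _ hm).2 h6
      · apply h
        have hEq : a ++ x = k' := h3.eq_of_length_le (by omega)
        have : a ++ x <+: a ++ w := by
          refine pv_prefix_append_left a ?_
          exact ⟨k ++ y, by rw [hxy, List.append_assoc]⟩
        rw [hEq] at this
        exact this

-- ---- vocabulary of the proof ----

def pvKeys : List (List Char) := pvPairsB.map (·.1)
def pvISC : List Char := "iscovered".toList
def pvBadStrs : List String :=
  ["was happyiscovered", "was sadiscovered", "was angryiscovered",
   "was scarediscovered", "realizediscovered"]
def pvBadL : List (List Char) := pvBadStrs.map (·.toList)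

theorem pvKeysNe : ∀ q ∈ pvPairsB, q.1 ≠ [] := by decide

def pvFold (ps : List (List Char × List Char)) (l : List Char) : List Char :=
  ps.foldl (fun t p => pvRepl p.1 p.2 t) l

def pvScan (l : List Char) : List Char :=
  match hf : pvPairsB.find? (fun p => p.1.isPrefixOf l) with
  | some p => p.2 ++ pvScan (l.drop p.1.length)
  | none =>
    match l with
    | [] => []
    | c :: t => c :: pvScan t
termination_by l.length
decreasing_by
  · have hmem := List.mem_of_find?_eq_some hf
    have hpre : p.1 <+: l := List.isPrefixOf_iff_prefix.mp (by simpa using List.find?_some hf)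
    have hne : p.1 ≠ [] := pvKeysNe p hmem
    have h1 := hpre.length_le
    have h2 : 0 < p.1.length := List.length_pos_iff.mpr hne
    simp only [List.length_drop]
    omega
  · simp

theorem pvScan_some {l : List Char} {p : List Char × List Char}
    (h : pvPairsB.find? (fun p => p.1.isPrefixOf l) = some p) :
    pvScan l = p.2 ++ pvScan (l.drop p.1.length) := by
  rw [pvScan]
  split
  · rename_i p' hp'
    rw [h] at hp'
    cases hp'
    rfl
  · rename_i hp'
    rw [h] at hp'
    cases hp'

theorem pvScan_none_cons {c : Char} {t : List Char}
    (h : pvPairsB.find? (fun p => p.1.isPrefixOf (c :: t)) = none) :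
    pvScan (c :: t) = c :: pvScan t := by
  rw [pvScan]
  split
  · rename_i p' hp'
    rw [h] at hp'
    cases hp'
  · rfl

theorem pvScan_nil : pvScan [] = [] := by
  rw [pvScan]
  have hnone : pvPairsB.find? (fun p => p.1.isPrefixOf ([] : List Char)) = none := by decide
  split
  · rename_i p hp'
    rw [hnone] at hp'
    cases hp'
  · rfl

theorem pvScanGo_spec : ∀ (fuel : Nat) (l : List Char) (out : List (List Char)),
    l.length ≤ fuel → (pvScanGo fuel l out).flatten = out.flatten ++ pvScan l := by
  intro fuel
  induction fuel with
  | zero =>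
    intro l out hl
    have : l = [] := List.length_eq_zero_iff.mp (Nat.le_zero.mp hl)
    subst this
    simp [pvScanGo, pvScan_nil]
  | succ f ih =>
    intro l out hl
    cases l with
    | nil => simp [pvScanGo, pvScan_nil]
    | cons c t =>
      rw [pvScanGo]
      cases hp : pvPairsB.find? (fun p => p.1.isPrefixOf (c :: t)) with
      | some p =>
        have hmem := List.mem_of_find?_eq_some hp
        have hpre : p.1 <+: c :: t := List.isPrefixOf_iff_prefix.mp (by simpa using List.find?_some hp)
        have hne : p.1 ≠ [] := pvKeysNe p hmem
        have h2 : 0 < p.1.length := List.length_pos_iff.mpr hne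
        have hf : ((c :: t).drop p.1.length).length ≤ f := by
          have := hpre.length_le
          simp only [List.length_drop, List.length_cons] at *
          omega
        rw [ih _ _ hf, pvScan_some hp]
        simp
      | none =>
        rw [ih t (out ++ [[c]]) (by simpa using hl), pvScan_none_cons hp]
        simp

-- ---- the skip lemmas for the sequential passes ----

theorem pvRepl_append (k v : List Char) (hk : k ≠ []) :
    ∀ (a u : List Char), (∀ q, q < a.length → ¬ k <+: a.drop q ++ u) →
      pvRepl k v (a ++ u) = a ++ pvRepl k v u := by
  intro a
  induction a with
  | nil => intro u _; simp
  | cons c a' ih =>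
    intro u h
    have h0 : ¬ k <+: c :: (a' ++ u) := by
      have := h 0 (by simp)
      simpa using this
    rw [List.cons_append, pvRepl_neg k v c (a' ++ u) h0,
      ih u (fun q hq => by simpa using h (q + 1) (by simpa using Nat.succ_lt_succ hq))]
    simp

-- no key (nor the junction word 'iscovered') ever newly appears at the head through a pass:
-- the finite side conditions of pv_preserve, checked over the literal table
theorem pvFactP : ∀ k' ∈ pvISC :: pvKeys, ∀ p ∈ pvPairsB, ∀ m, m < k'.length →
    ¬ (k'.drop m <+: p.2) ∧ ¬ (p.2 <+: k'.drop m) := by decide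

theorem pv_fold_cons (ps : List (List Char × List Char)) (hps : ∀ p ∈ ps, p ∈ pvPairsB)
    (c : Char) (u : List Char) (h : ∀ k' ∈ pvKeys, ¬ k' <+: c :: u) :
    pvFold ps (c :: u) = c :: pvFold ps u := by
  induction ps generalizing u with
  | nil => rfl
  | cons p ps' ih =>
    have hpmem := hps p (by simp)
    have hk : p.1 ≠ [] := pvKeysNe p hpmem
    have hk1 : p.1 ∈ pvKeys := List.mem_map_of_mem hpmem
    have hstep := pvRepl_neg p.1 p.2 c u (h p.1 hk1)
    show pvFold ps' (pvRepl p.1 p.2 (c :: u)) = c :: pvFold ps' (pvRepl p.1 p.2 u)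
    rw [hstep]
    refine ih (fun q hq => hps q (by simp [hq])) (pvRepl p.1 p.2 u) ?_
    intro k' hk'
    have hcond := fun m hm => pvFactP k' (by simp [hk']) p hpmem m hm
    have := pv_preserve p.1 p.2 k' hk hcond [c] u (by simpa using h k' hk')
    simpa using this

-- 'iscovered' never newly appears at the head through the passes
theorem pv_fold_isc (ps : List (List Char × List Char)) (hps : ∀ p ∈ ps, p ∈ pvPairsB)
    (u : List Char) (h : ¬ pvISC <+: u) : ¬ pvISC <+: pvFold ps u := by
  induction ps generalizing u with
  | nil => exact h
  | cons p ps' ih =>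
    have hpmem := hps p (by simp)
    have hk : p.1 ≠ [] := pvKeysNe p hpmem
    have hcond := fun m hm => pvFactP pvISC (by simp) p hpmem m hm
    have hstep := pv_preserve p.1 p.2 pvISC hk hcond [] u (by simpa using h)
    exact ih (fun q hq => hps q (by simp [hq])) _ (by simpa using hstep)

-- passes of ps slide over a fixed block `a` when no key of ps can match inside it,
-- except possibly at the 'iscovered' junction, which the invariant rules out
def pvTBL (a k : List Char) : Bool :=
  decide (∀ q, q < a.length → ¬ k <+: a.drop q ∧ (a.drop q <+: k → k.drop (a.length - q) = pvISC))

theorem pv_fold_skip (ps : List (List Char × List Char)) (hps : ∀ p ∈ ps, p ∈ pvPairsB)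
    (a : List Char) (htbl : ∀ p ∈ ps, pvTBL a p.1 = true) :
    ∀ u, ¬ pvISC <+: u → pvFold ps (a ++ u) = a ++ pvFold ps u := by
  induction ps with
  | nil => intro u _; rfl
  | cons p ps' ih =>
    intro u hinv
    have hpmem := hps p (by simp)
    have hk : p.1 ≠ [] := pvKeysNe p hpmem
    have hq : ∀ q, q < a.length → ¬ p.1 <+: a.drop q ++ u := by
      intro q hqa hpre
      rcases pv_prefix_split p.1 (a.drop q) u hpre with h1 | ⟨h2, h3⟩
      · exact (of_decide_eq_true (htbl p (by simp)) q hqa).1 h1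
      · have hlen : (a.drop q).length = a.length - q := by simp
        have := (of_decide_eq_true (htbl p (by simp)) q hqa).2 h2
        rw [hlen, this] at h3
        exact hinv h3
    have hstep := pvRepl_append p.1 p.2 hk a u hq
    show pvFold ps' (pvRepl p.1 p.2 (a ++ u)) = a ++ pvFold ps' (pvRepl p.1 p.2 u)
    rw [hstep]
    have hcond := fun m hm => pvFactP pvISC (by simp) p hpmem m hm
    have hinv' := pv_preserve p.1 p.2 pvISC hk hcond [] u (by simpa using hinv)
    exact ih (fun q hq => hps q (by simp [hq])) (fun q hq => htbl q (by simp [hq]))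
      (pvRepl p.1 p.2 u) (by simpa using hinv')

-- passes of ps slide over `a` when no key of ps can match inside it at all
def pvTBL' (a k : List Char) : Bool :=
  decide (∀ q, q < a.length → ¬ k <+: a.drop q ∧ ¬ a.drop q <+: k)

theorem pv_fold_skip' (ps : List (List Char × List Char)) (hps : ∀ p ∈ ps, p ∈ pvPairsB)
    (a : List Char) (htbl : ∀ p ∈ ps, pvTBL' a p.1 = true) :
    ∀ u, pvFold ps (a ++ u) = a ++ pvFold ps u := by
  induction ps with
  | nil => intro u; rfl
  | cons p ps' ih =>
    intro u
    have hpmem := hps p (by simp)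
    have hk : p.1 ≠ [] := pvKeysNe p hpmem
    have hq : ∀ q, q < a.length → ¬ p.1 <+: a.drop q ++ u := by
      intro q hqa hpre
      rcases pv_prefix_split p.1 (a.drop q) u hpre with h1 | ⟨h2, _⟩
      · exact (of_decide_eq_true (htbl p (by simp)) q hqa).1 h1
      · exact (of_decide_eq_true (htbl p (by simp)) q hqa).2 h2
    have hstep := pvRepl_append p.1 p.2 hk a u hq
    show pvFold ps' (pvRepl p.1 p.2 (a ++ u)) = a ++ pvFold ps' (pvRepl p.1 p.2 u)
    rw [hstep]
    exact ih (fun q hq => hps q (by simp [hq])) (fun q hq => htbl q (by simp [hq])) (pvRepl p.1 p.2 u)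

-- one head-match step of the sequential passes, the generic shape
theorem pv_case (P1 P2 : List (List Char × List Char)) (pi : List Char × List Char)
    (heq : pvPairsB = P1 ++ pi :: P2)
    (htbl1 : ∀ p ∈ P1, pvTBL pi.1 p.1 = true) (htbl2 : ∀ p ∈ P2, pvTBL pi.2 p.1 = true)
    (rest : List Char) (hinv : ¬ pvISC <+: rest) :
    pvFold pvPairsB (pi.1 ++ rest) = pi.2 ++ pvFold pvPairsB rest := by
  have hP1 : ∀ p ∈ P1, p ∈ pvPairsB := by intro p hp; rw [heq]; simp [hp]
  have hP2 : ∀ p ∈ P2, p ∈ pvPairsB := by intro p hp; rw [heq]; simp [hp]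
  have hpi : pi ∈ pvPairsB := by rw [heq]; simp
  have hk : pi.1 ≠ [] := pvKeysNe pi hpi
  have e1 : ∀ x, pvFold pvPairsB x = pvFold P2 (pvRepl pi.1 pi.2 (pvFold P1 x)) := by
    intro x
    rw [heq]
    simp [pvFold, List.foldl_append]
  rw [e1, e1]
  rw [pv_fold_skip P1 hP1 pi.1 htbl1 rest hinv]
  rw [pvRepl_head pi.1 pi.2 _ hk]
  have hinv2 := pv_fold_isc P1 hP1 rest hinv
  have hcond := fun m hm => pvFactP pvISC (by simp) pi hpi m hm
  have hinv3 : ¬ pvISC <+: pvRepl pi.1 pi.2 (pvFold P1 rest) := by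
    simpa using pv_preserve pi.1 pi.2 pvISC hk hcond [] _ (by simpa using hinv2)
  rw [pv_fold_skip P2 hP2 pi.2 htbl2 _ hinv3]

-- same, for a pair whose block no key can touch in any way ('discovered')
theorem pv_case' (P1 P2 : List (List Char × List Char)) (pi : List Char × List Char)
    (heq : pvPairsB = P1 ++ pi :: P2)
    (htbl1 : ∀ p ∈ P1, pvTBL' pi.1 p.1 = true) (htbl2 : ∀ p ∈ P2, pvTBL' pi.2 p.1 = true)
    (rest : List Char) :
    pvFold pvPairsB (pi.1 ++ rest) = pi.2 ++ pvFold pvPairsB rest := by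
  have hP1 : ∀ p ∈ P1, p ∈ pvPairsB := by intro p hp; rw [heq]; simp [hp]
  have hP2 : ∀ p ∈ P2, p ∈ pvPairsB := by intro p hp; rw [heq]; simp [hp]
  have hpi : pi ∈ pvPairsB := by rw [heq]; simp
  have hk : pi.1 ≠ [] := pvKeysNe pi hpi
  have e1 : ∀ x, pvFold pvPairsB x = pvFold P2 (pvRepl pi.1 pi.2 (pvFold P1 x)) := by
    intro x
    rw [heq]
    simp [pvFold, List.foldl_append]
  rw [e1, e1]
  rw [pv_fold_skip' P1 hP1 pi.1 htbl1 rest]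
  rw [pvRepl_head pi.1 pi.2 _ hk]
  rw [pv_fold_skip' P2 hP2 pi.2 htbl2 _]

-- a head match of pair (ki, vi), with its junction string in the bad list
theorem pv_branch (ki vi : List Char) (P1 P2 : List (List Char × List Char))
    (heq : pvPairsB = P1 ++ (ki, vi) :: P2)
    (htbl1 : ∀ p ∈ P1, pvTBL ki p.1 = true) (htbl2 : ∀ p ∈ P2, pvTBL vi p.1 = true)
    (hbadmem : ki ++ pvISC ∈ pvBadL)
    (f : Nat) (ih : ∀ l : List Char, l.length ≤ f → (∀ b ∈ pvBadL, ¬ b <:+: l) → pvFold pvPairsB l = pvScan l)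
    (rest : List Char) (hlen : (ki ++ rest).length ≤ f + 1)
    (hbad : ∀ b ∈ pvBadL, ¬ b <:+: ki ++ rest)
    (hfind : pvPairsB.find? (fun p => p.1.isPrefixOf (ki ++ rest)) = some (ki, vi)) :
    pvFold pvPairsB (ki ++ rest) = pvScan (ki ++ rest) := by
  have hpi : (ki, vi) ∈ pvPairsB := by rw [heq]; simp
  have hk : ki ≠ [] := pvKeysNe _ hpi
  have hinv : ¬ pvISC <+: rest := by
    intro hisc
    exact hbad _ hbadmem (pv_prefix_append_left ki hisc).isInfix
  have hgood : ∀ b ∈ pvBadL, ¬ b <:+: rest := fun b hb hbr =>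
    hbad b hb (hbr.trans (List.suffix_append ki rest).isInfix)
  rw [pvScan_some hfind]
  simp only [List.drop_left]
  rw [pv_case P1 P2 (ki, vi) heq htbl1 htbl2 rest hinv]
  congr 1
  apply ih rest ?_ hgood
  have h0 : 0 < ki.length := List.length_pos_iff.mpr hk
  rw [List.length_append] at hlen
  omega

-- the same for 'discovered', which needs no junction exclusion
theorem pv_branch' (ki vi : List Char) (P1 P2 : List (List Char × List Char))
    (heq : pvPairsB = P1 ++ (ki, vi) :: P2)
    (htbl1 : ∀ p ∈ P1, pvTBL' ki p.1 = true) (htbl2 : ∀ p ∈ P2, pvTBL' vi p.1 = true)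
    (f : Nat) (ih : ∀ l : List Char, l.length ≤ f → (∀ b ∈ pvBadL, ¬ b <:+: l) → pvFold pvPairsB l = pvScan l)
    (rest : List Char) (hlen : (ki ++ rest).length ≤ f + 1)
    (hbad : ∀ b ∈ pvBadL, ¬ b <:+: ki ++ rest)
    (hfind : pvPairsB.find? (fun p => p.1.isPrefixOf (ki ++ rest)) = some (ki, vi)) :
    pvFold pvPairsB (ki ++ rest) = pvScan (ki ++ rest) := by
  have hpi : (ki, vi) ∈ pvPairsB := by rw [heq]; simp
  have hk : ki ≠ [] := pvKeysNe _ hpi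
  have hgood : ∀ b ∈ pvBadL, ¬ b <:+: rest := fun b hb hbr =>
    hbad b hb (hbr.trans (List.suffix_append ki rest).isInfix)
  rw [pvScan_some hfind]
  simp only [List.drop_left]
  rw [pv_case' P1 P2 (ki, vi) heq htbl1 htbl2 rest]
  congr 1
  apply ih rest ?_ hgood
  have h0 : 0 < ki.length := List.length_pos_iff.mpr hk
  rw [List.length_append] at hlen
  omega

-- ---- MAIN: on texts avoiding the five junctions, the six passes equal the one-pass scan ----

set_option maxHeartbeats 2000000 in
theorem pv_main : ∀ (n : Nat) (l : List Char), l.length ≤ n →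
    (∀ b ∈ pvBadL, ¬ b <:+: l) → pvFold pvPairsB l = pvScan l := by
  intro n
  induction n with
  | zero =>
    intro l hl _
    have : l = [] := List.length_eq_zero_iff.mp (Nat.le_zero.mp hl)
    subst this
    rw [pvScan_nil]
    simp [pvFold, pvPairsB, pvRepl_nil]
  | succ f ih =>
    intro l hl hbad
    by_cases h1 : "was happy".toList <+: l
    case pos =>
      obtain ⟨rest, rfl⟩ := h1
      refine pv_branch "was happy".toList "smiled".toList ([] : List (List Char × List Char))
        [("was sad".toList, "frowned".toList), ("was angry".toList, "scowled".toList), ("was scared".toList, "cowered".toList), ("discovered".toList, "found".toList), ("realized".toList, "understood".toList)] rfl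
        (by decide) (by decide) (by decide) f ih rest hl hbad ?_
      rw [show pvPairsB = [("was happy".toList, "smiled".toList), ("was sad".toList, "frowned".toList), ("was angry".toList, "scowled".toList), ("was scared".toList, "cowered".toList), ("discovered".toList, "found".toList), ("realized".toList, "understood".toList)] from rfl]
      exact List.find?_cons_of_pos (by simp only [List.isPrefixOf_iff_prefix]; exact List.prefix_append _ _)
    case neg =>
        by_cases h2 : "was sad".toList <+: l
        case pos =>
          obtain ⟨rest, rfl⟩ := h2
          refine pv_branch "was sad".toList "frowned".toList [("was happy".toList, "smiled".toList)]
            [("was angry".toList, "scowled".toList), ("was scared".toList, "cowered".toList), ("discovered".toList, "found".toList), ("realized".toList, "understood".toList)] rfl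
            (by decide) (by decide) (by decide) f ih rest hl hbad ?_
          rw [show pvPairsB = [("was happy".toList, "smiled".toList), ("was sad".toList, "frowned".toList), ("was angry".toList, "scowled".toList), ("was scared".toList, "cowered".toList), ("discovered".toList, "found".toList), ("realized".toList, "understood".toList)] from rfl,
            List.find?_cons_of_neg (by simp only [List.isPrefixOf_iff_prefix]; exact h1)]
          exact List.find?_cons_of_pos (by simp only [List.isPrefixOf_iff_prefix]; exact List.prefix_append _ _)
        case neg =>
            by_cases h3 : "was angry".toList <+: l
            case pos =>
              obtain ⟨rest, rfl⟩ := h3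
              refine pv_branch "was angry".toList "scowled".toList [("was happy".toList, "smiled".toList), ("was sad".toList, "frowned".toList)]
                [("was scared".toList, "cowered".toList), ("discovered".toList, "found".toList), ("realized".toList, "understood".toList)] rfl
                (by decide) (by decide) (by decide) f ih rest hl hbad ?_
              rw [show pvPairsB = [("was happy".toList, "smiled".toList), ("was sad".toList, "frowned".toList), ("was angry".toList, "scowled".toList), ("was scared".toList, "cowered".toList), ("discovered".toList, "found".toList), ("realized".toList, "understood".toList)] from rfl,
                List.find?_cons_of_neg (by simp only [List.isPrefixOf_iff_prefix]; exact h1),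
                List.find?_cons_of_neg (by simp only [List.isPrefixOf_iff_prefix]; exact h2)]
              exact List.find?_cons_of_pos (by simp only [List.isPrefixOf_iff_prefix]; exact List.prefix_append _ _)
            case neg =>
                by_cases h4 : "was scared".toList <+: l
                case pos =>
                  obtain ⟨rest, rfl⟩ := h4
                  refine pv_branch "was scared".toList "cowered".toList [("was happy".toList, "smiled".toList), ("was sad".toList, "frowned".toList), ("was angry".toList, "scowled".toList)]
                    [("discovered".toList, "found".toList), ("realized".toList, "understood".toList)] rfl
                    (by decide) (by decide) (by decide) f ih rest hl hbad ?_
                  rw [show pvPairsB = [("was happy".toList, "smiled".toList), ("was sad".toList, "frowned".toList), ("was angry".toList, "scowled".toList), ("was scared".toList, "cowered".toList), ("discovered".toList, "found".toList), ("realized".toList, "understood".toList)] from rfl,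
                    List.find?_cons_of_neg (by simp only [List.isPrefixOf_iff_prefix]; exact h1),
                    List.find?_cons_of_neg (by simp only [List.isPrefixOf_iff_prefix]; exact h2),
                    List.find?_cons_of_neg (by simp only [List.isPrefixOf_iff_prefix]; exact h3)]
                  exact List.find?_cons_of_pos (by simp only [List.isPrefixOf_iff_prefix]; exact List.prefix_append _ _)
                case neg =>
                    by_cases h5 : "discovered".toList <+: l
                    case pos =>
                      obtain ⟨rest, rfl⟩ := h5
                      refine pv_branch' "discovered".toList "found".toList [("was happy".toList, "smiled".toList), ("was sad".toList, "frowned".toList), ("was angry".toList, "scowled".toList), ("was scared".toList, "cowered".toList)]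
                        [("realized".toList, "understood".toList)] rfl
                        (by decide) (by decide) f ih rest hl hbad ?_
                      rw [show pvPairsB = [("was happy".toList, "smiled".toList), ("was sad".toList, "frowned".toList), ("was angry".toList, "scowled".toList), ("was scared".toList, "cowered".toList), ("discovered".toList, "found".toList), ("realized".toList, "understood".toList)] from rfl,
                        List.find?_cons_of_neg (by simp only [List.isPrefixOf_iff_prefix]; exact h1),
                        List.find?_cons_of_neg (by simp only [List.isPrefixOf_iff_prefix]; exact h2),
                        List.find?_cons_of_neg (by simp only [List.isPrefixOf_iff_prefix]; exact h3),
                        List.find?_cons_of_neg (by simp only [List.isPrefixOf_iff_prefix]; exact h4)]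
                      exact List.find?_cons_of_pos (by simp only [List.isPrefixOf_iff_prefix]; exact List.prefix_append _ _)
                    case neg =>
                        by_cases h6 : "realized".toList <+: l
                        case pos =>
                          obtain ⟨rest, rfl⟩ := h6
                          refine pv_branch "realized".toList "understood".toList [("was happy".toList, "smiled".toList), ("was sad".toList, "frowned".toList), ("was angry".toList, "scowled".toList), ("was scared".toList, "cowered".toList), ("discovered".toList, "found".toList)]
                            ([] : List (List Char × List Char)) rfl
                            (by decide) (by decide) (by decide) f ih rest hl hbad ?_
                          rw [show pvPairsB = [("was happy".toList, "smiled".toList), ("was sad".toList, "frowned".toList), ("was angry".toList, "scowled".toList), ("was scared".toList, "cowered".toList), ("discovered".toList, "found".toList), ("realized".toList, "understood".toList)] from rfl,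
                            List.find?_cons_of_neg (by simp only [List.isPrefixOf_iff_prefix]; exact h1),
                            List.find?_cons_of_neg (by simp only [List.isPrefixOf_iff_prefix]; exact h2),
                            List.find?_cons_of_neg (by simp only [List.isPrefixOf_iff_prefix]; exact h3),
                            List.find?_cons_of_neg (by simp only [List.isPrefixOf_iff_prefix]; exact h4),
                            List.find?_cons_of_neg (by simp only [List.isPrefixOf_iff_prefix]; exact h5)]
                          exact List.find?_cons_of_pos (by simp only [List.isPrefixOf_iff_prefix]; exact List.prefix_append _ _)
                        case neg =>
                            have hfind : pvPairsB.find? (fun p => p.1.isPrefixOf l) = none := by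
                              apply List.find?_eq_none.mpr
                              intro p hp
                              simp only [pvPairsB, List.mem_cons, List.not_mem_nil, or_false] at hp
                              rcases hp with rfl | rfl | rfl | rfl | rfl | rfl <;>
                                (simp only [List.isPrefixOf_iff_prefix]; assumption)
                            cases l with
                            | nil =>
                              rw [pvScan_nil]
                              simp [pvFold, pvPairsB, pvRepl_nil]
                            | cons c t =>
                              rw [pvScan_none_cons hfind]
                              rw [pv_fold_cons pvPairsB (fun p hp => hp) c t ?hks]
                              case hks =>
                                intro k' hk'
                                simp only [pvKeys, pvPairsB, List.map_cons, List.map_nil, List.mem_cons,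
                                  List.not_mem_nil, or_false] at hk'
                                rcases hk' with rfl | rfl | rfl | rfl | rfl | rfl <;> assumption
                              congr 1
                              apply ih t (by simp only [List.length_cons] at hl; omega)
                              intro b hb hbt
                              exact hbad b hb (List.infix_cons hbt)

-- ---- bridges from the ports to pvFold / pvScan ----

theorem pv_foldStr (ps : List (String × String)) (hps : ∀ p ∈ ps, p.1.toList ≠ []) :
    ∀ t : String, ps.foldl (fun t p => PySem.Str.replace t p.1 p.2) t =
      String.ofList (pvFold (ps.map fun p => (p.1.toList, p.2.toList)) t.toList) := by
  induction ps with
  | nil => intro t; simp [pvFold, String.ofList_toList]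
  | cons p ps' ih =>
    intro t
    rw [List.foldl_cons, ih (fun q hq => hps q (by simp [hq]))]
    have hx : (PySem.Str.replace t p.1 p.2).toList = pvRepl p.1.toList p.2.toList t.toList := by
      rw [PySem.Str.toList_replace, pv_replace_eq _ _ _ (hps p (by simp))]
    simp only [List.map_cons, pvFold, List.foldl_cons]
    rw [hx]

theorem pvA_eq (s : String) :
    enhance_panel_description s = String.ofList (pvFold pvPairsB s.toList) := by
  have hitems : pvReplacementsA.items =
      [("was happy", "smiled"), ("was sad", "frowned"), ("was angry", "scowled"),
       ("was scared", "cowered"), ("discovered", "found"), ("realized", "understood")] := by decide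
  rw [enhance_panel_description, hitems, pv_foldStr _ (by decide) s]
  rfl

theorem pvB_eq (s : String) :
    enhance_panel_description_alt s = String.ofList (pvScan s.toList) := by
  rw [enhance_panel_description_alt, pvScanGo_spec _ _ _ le_rfl]
  simp

-- ===== VERDICT (by name: the statement is the Claim_ definition above) =====
theorem enhance_panel_description_spec : Claim_equal_enhance_panel_description := by
  intro s _ hPre
  unfold Spec_enhance_panel_description
  rw [pvA_eq, pvB_eq]
  congr 1
  apply pv_main s.toList.length s.toList le_rfl
  intro b hb hinf
  unfold Pre_enhance_panel_description at hPre
  simp only [Bool.or_eq_false_iff] at hPre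
  rw [pvBadL, pvBadStrs] at hb
  simp only [List.map_cons, List.map_nil, List.mem_cons, List.not_mem_nil, or_false] at hb
  rcases hb with rfl | rfl | rfl | rfl | rfl
  · have hx := (PySem.Str.isIn_iff_infix _ s).mpr hinf
    rw [hPre.1.1.1.1] at hx
    cases hx
  · have hx := (PySem.Str.isIn_iff_infix _ s).mpr hinf
    rw [hPre.1.1.1.2] at hx
    cases hx
  · have hx := (PySem.Str.isIn_iff_infix _ s).mpr hinf
    rw [hPre.1.1.2] at hx
    cases hx
  · have hx := (PySem.Str.isIn_iff_infix _ s).mpr hinf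
    rw [hPre.1.2] at hx
    cases hx
  · have hx := (PySem.Str.isIn_iff_infix _ s).mpr hinf
    rw [hPre.2] at hx
    cases hx
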